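-- pv_equiv track=rewrite | github.com/TomasSanchez-01/Sanchez.Tomas.PrimerParcial- | PRIMER PARCIAL/PARCIAL_1ERA_PARTE/funciones.py | accion_con_mayor_o_menor_inversion
-- ===== SOURCE A (Python) =====
-- def sumar_columnas(matriz:list) -> list:
--     """Suma columnas de una matriz
--
--     Args:
--         matriz (list): matriz la cual queres sumar sus columnas
--
--     Returns:
--         list: retorna una lista con la suma de cada columna
--     """
--     total_por_columnas = [0] * len(matriz[0])
--
--     for j in range(len(matriz[0])):
--         for i in range(len(matriz)):
--             total_por_columnas[j] += matriz[i][j]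
--
--     return total_por_columnas
--
-- def calcular_matriz_total_invertido(matriz: list, vector_precios: list) -> list:
--     """Calcula el valor de las acciones por empresa y por usuario y los devuelve a la matriz
--
--     Args:
--         matriz (list): matriz de acciones compradas
--         vector_precios (list): lista de precios de las acciones
--
--     Returns:
--         list: retorna una matriz con el valor en US$ de las acciones compradas
--     """
--     matriz_total = [[0] * len(matriz[0]) for i in range(len(matriz))]
--
--     for i in range(len(matriz)):
--         for j in range(len(matriz[i])):
--             matriz_total [i][j] = matriz [i][j] * vector_precios [j]
--
--     return matriz_total
--
-- def accion_con_mayor_o_menor_inversion(matriz: list, vector_precios: list, mayor_recaudacion: bool ) -> int: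
--     """Calcula la empresa que mas o menos dinero recaudó
--
--     Args:
--         matriz (list): matriz de acciones compradas
--         vector_precios (list): lista de precios de las acciones de las empresas
--         mayor_recaudacion (bool): True: para calcular que que empresa recaudó mas| False: para calcular que que empresa recaudó menos
--
--     Returns:
--         int: retorna el indice de la empresa del vector_empresas que mas o menos dinero recaudó
--     """
--     matriz_total_inversiones = calcular_matriz_total_invertido(matriz, vector_precios)
--     vector_suma = sumar_columnas(matriz_total_inversiones)
--
--     maximo = vector_suma[0]
--     indice_maximo = 0
--
--     for i in range(len(vector_suma)):
--         if mayor_recaudacion == True: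
--             if vector_suma[i] > maximo:
--                 maximo = vector_suma[i]
--                 indice_maximo = i
--         else:
--             if vector_suma[i] < maximo:
--                 maximo = vector_suma[i]
--                 indice_maximo = i
--
--     return indice_maximo
-- ===== SOURCE B (Python) =====
-- def accion_con_mayor_o_menor_inversion(matriz: list, vector_precios: list, mayor_recaudacion: bool) -> int:
--     totales = [0] * len(matriz[0])
--     for fila in matriz:
--         for j in range(len(fila)):
--             totales[j] += fila[j] * vector_precios[j]
--     if mayor_recaudacion == True:
--         return totales.index(max(totales))
--     return totales.index(min(totales))
-- ===== Notes on version B (the rewrite author's own statement) =====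
-- stated objective: simpler
-- what changed: One fused row-major loop accumulates the weighted column totals directly (no intermediate weighted matrix, no separate column-sum pass; single pass over the data), and the answer index is picked idiomatically with totales.index(max/min(totales)) instead of a hand-written running-best scan.
import Mathlib
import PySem

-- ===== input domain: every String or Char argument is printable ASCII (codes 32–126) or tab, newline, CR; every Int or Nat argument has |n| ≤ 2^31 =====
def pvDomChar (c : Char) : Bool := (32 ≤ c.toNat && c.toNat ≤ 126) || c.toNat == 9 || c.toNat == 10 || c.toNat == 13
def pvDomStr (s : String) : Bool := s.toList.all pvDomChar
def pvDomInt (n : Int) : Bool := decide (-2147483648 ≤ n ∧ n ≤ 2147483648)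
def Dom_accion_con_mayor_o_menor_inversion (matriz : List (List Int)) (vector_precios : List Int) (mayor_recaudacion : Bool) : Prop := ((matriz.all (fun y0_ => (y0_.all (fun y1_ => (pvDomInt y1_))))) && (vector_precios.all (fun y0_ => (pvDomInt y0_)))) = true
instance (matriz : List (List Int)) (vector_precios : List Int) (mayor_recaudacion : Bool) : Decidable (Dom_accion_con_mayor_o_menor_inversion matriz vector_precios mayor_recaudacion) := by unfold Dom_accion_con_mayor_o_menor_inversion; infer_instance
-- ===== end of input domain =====

-- B fuses the weighted-matrix construction and the column sums into one row-major
-- accumulation loop and picks the answer with totales.index(max/min(totales));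
-- objective: simpler (same asymptotic cost, no intermediate matrix, no hand-written scan).

-- ===== PORT A =====
-- helper: calcular_matriz_total_invertido
def pvA_calcular (matriz : List (List Int)) (vector_precios : List Int) : List (List Int) :=
  let matriz_total := List.replicate matriz.length (List.replicate (matriz.headD []).length (0 : Int))
  (List.range matriz.length).foldl (fun mt i =>
    (List.range (matriz.getD i []).length).foldl (fun mt j =>
      mt.set i ((mt.getD i []).set j ((matriz.getD i []).getD j 0 * vector_precios.getD j 0))) mt)
    matriz_total

-- helper: sumar_columnas
def pvA_sumar (mt : List (List Int)) : List Int :=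
  let total_por_columnas := List.replicate (mt.headD []).length (0 : Int)
  (List.range (mt.headD []).length).foldl (fun tot j =>
    (List.range mt.length).foldl (fun tot i =>
      tot.set j (tot.getD j 0 + (mt.getD i []).getD j 0)) tot)
    total_por_columnas

def accion_con_mayor_o_menor_inversion (matriz : List (List Int)) (vector_precios : List Int) (mayor_recaudacion : Bool) : Int :=
  let vector_suma := pvA_sumar (pvA_calcular matriz vector_precios)
  let st := (List.range vector_suma.length).foldl (fun (st : Int × Int) i =>
    if mayor_recaudacion == true then
      if vector_suma.getD i 0 > st.1 then (vector_suma.getD i 0, (i : Int)) else st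
    else
      if vector_suma.getD i 0 < st.1 then (vector_suma.getD i 0, (i : Int)) else st)
    (vector_suma.getD 0 0, 0)
  st.2

-- ===== PORT B =====
def accion_con_mayor_o_menor_inversion_alt (matriz : List (List Int)) (vector_precios : List Int) (mayor_recaudacion : Bool) : Int :=
  let totales := matriz.foldl (fun tot fila =>
    (List.range fila.length).foldl (fun tot j =>
      tot.set j (tot.getD j 0 + fila.getD j 0 * vector_precios.getD j 0)) tot)
    (List.replicate (matriz.headD []).length (0 : Int))
  if mayor_recaudacion == true then
    match PySem.List.max? totales (fun x => x) with
    | some m => (((PySem.List.index? totales m).getD 0 : Nat) : Int)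
    | none => 0
  else
    match PySem.List.min? totales (fun x => x) with
    | some m => (((PySem.List.index? totales m).getD 0 : Nat) : Int)
    | none => 0

-- ===== PRECONDITION & SPEC =====
-- Pre_ is exactly where the Python A returns: a nonempty matrix with a nonempty first
-- row, every row no longer than the first row (else IndexError writing matriz_total)
-- and no longer than vector_precios (else IndexError reading vector_precios).
def Pre_accion_con_mayor_o_menor_inversion (matriz : List (List Int)) (vector_precios : List Int) (mayor_recaudacion : Bool) : Prop :=
  matriz ≠ [] ∧ matriz.headD [] ≠ [] ∧
  ∀ fila ∈ matriz, fila.length ≤ (matriz.headD []).length ∧ fila.length ≤ vector_precios.length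
instance (matriz : List (List Int)) (vector_precios : List Int) (mayor_recaudacion : Bool) : Decidable (Pre_accion_con_mayor_o_menor_inversion matriz vector_precios mayor_recaudacion) := by unfold Pre_accion_con_mayor_o_menor_inversion; infer_instance

def pvWitness_accion_con_mayor_o_menor_inversion : List (List Int) × List Int × Bool := ([[1, 2], [3, 4]], [5, 6], true)

def Spec_accion_con_mayor_o_menor_inversion (matriz : List (List Int)) (vector_precios : List Int) (mayor_recaudacion : Bool) (out : Int) : Prop := out = accion_con_mayor_o_menor_inversion_alt matriz vector_precios mayor_recaudacion
instance (matriz : List (List Int)) (vector_precios : List Int) (mayor_recaudacion : Bool) (out : Int) : Decidable (Spec_accion_con_mayor_o_menor_inversion matriz vector_precios mayor_recaudacion out) := by unfold Spec_accion_con_mayor_o_menor_inversion; infer_instance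

-- ===== CLAIM (what is proved, stated in full; the proofs are below) =====
def Claim_equal_accion_con_mayor_o_menor_inversion : Prop := ∀ (matriz : List (List Int)) (vector_precios : List Int) (mayor_recaudacion : Bool), Dom_accion_con_mayor_o_menor_inversion matriz vector_precios mayor_recaudacion → Pre_accion_con_mayor_o_menor_inversion matriz vector_precios mayor_recaudacion → Spec_accion_con_mayor_o_menor_inversion matriz vector_precios mayor_recaudacion (accion_con_mayor_o_menor_inversion matriz vector_precios mayor_recaudacion)

-- ===== LEMMAS AND PROOFS =====

-- the weighted contribution of row `fila` to column j (0 beyond the row's end)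
def pvContrib (vp fila : List Int) (j : Nat) : Int :=
  if j < fila.length then fila.getD j 0 * vp.getD j 0 else 0

-- weighted total of column j
def pvCol (matriz : List (List Int)) (vp : List Int) (j : Nat) : Int :=
  (matriz.map (fun f => pvContrib vp f j)).sum

lemma pv_getD_set {α : Type} (xs : List α) (i j : Nat) (v d : α) :
    (xs.set i v).getD j d = if i = j ∧ j < xs.length then v else xs.getD j d := by
  simp [List.getD_eq_getElem?_getD, List.getElem?_set]
  split_ifs <;> simp_all

lemma pv_fold_set_assign (g : Nat → Int) : ∀ (k : Nat) (tot : List Int), k ≤ tot.length →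
    ((List.range k).foldl (fun t j => t.set j (g j)) tot).length = tot.length ∧
    ∀ j, ((List.range k).foldl (fun t j => t.set j (g j)) tot).getD j 0
        = if j < k then g j else tot.getD j 0 := by
  intro k
  induction k with
  | zero => intro tot _; simp
  | succ k ih =>
    intro tot hk
    obtain ⟨ihlen, ihget⟩ := ih tot (by omega)
    rw [List.range_succ, List.foldl_append]
    simp only [List.foldl_cons, List.foldl_nil]
    constructor
    · simp [ihlen]
    · intro j
      rw [pv_getD_set, ihlen, ihget]
      by_cases hjk : j = k
      · subst hjk; rw [if_pos ⟨rfl, by omega⟩, if_pos (by omega)]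
      · rw [if_neg (by rintro ⟨rfl, -⟩; exact hjk rfl)]
        by_cases hj : j < k
        · rw [if_pos hj, if_pos (by omega)]
        · rw [if_neg hj, if_neg (by omega)]

lemma pv_fold_set_add (g : Nat → Int) : ∀ (k : Nat) (tot : List Int), k ≤ tot.length →
    ((List.range k).foldl (fun t j => t.set j (t.getD j 0 + g j)) tot).length = tot.length ∧
    ∀ j, ((List.range k).foldl (fun t j => t.set j (t.getD j 0 + g j)) tot).getD j 0
        = tot.getD j 0 + (if j < k then g j else 0) := by
  intro k
  induction k with
  | zero => intro tot _; simp
  | succ k ih =>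
    intro tot hk
    obtain ⟨ihlen, ihget⟩ := ih tot (by omega)
    rw [List.range_succ, List.foldl_append]
    simp only [List.foldl_cons, List.foldl_nil]
    constructor
    · rw [List.length_set]; exact ihlen
    · intro j
      rw [pv_getD_set, ihlen]
      by_cases hjk : j = k
      · subst hjk
        rw [if_pos ⟨rfl, by omega⟩, ihget, if_neg (by omega), if_pos (by omega)]
        ring
      · rw [if_neg (by rintro ⟨rfl, -⟩; exact hjk rfl), ihget]
        by_cases hj : j < k
        · rw [if_pos hj, if_pos (by omega)]
        · rw [if_neg hj, if_neg (by omega)]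

lemma pv_fold_set_fixed (h : Nat → Int) (j : Nat) : ∀ (m : Nat) (tot : List Int),
    ((List.range m).foldl (fun t i => t.set j (t.getD j 0 + h i)) tot).length = tot.length ∧
    ∀ j', ((List.range m).foldl (fun t i => t.set j (t.getD j 0 + h i)) tot).getD j' 0
        = if j' = j ∧ j < tot.length then tot.getD j 0 + ((List.range m).map h).sum else tot.getD j' 0 := by
  intro m
  induction m with
  | zero =>
    intro tot; refine ⟨rfl, fun j' => ?_⟩
    simp only [List.range_zero, List.foldl_nil, List.map_nil, List.sum_nil, add_zero]
    split_ifs with h1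
    · obtain ⟨rfl, -⟩ := h1; rfl
    · rfl
  | succ m ih =>
    intro tot
    obtain ⟨ihlen, ihget⟩ := ih tot
    constructor
    · rw [List.range_succ, List.foldl_append]
      simp only [List.foldl_cons, List.foldl_nil]
      rw [List.length_set]; exact ihlen
    · intro j'
      rw [List.range_succ, List.foldl_append]
      simp only [List.foldl_cons, List.foldl_nil]
      rw [pv_getD_set, ihlen, List.map_append, List.sum_append]
      simp only [List.map_cons, List.map_nil, List.sum_cons, List.sum_nil, add_zero, ihget]
      by_cases hjl : j < tot.length
      · by_cases hj' : j' = j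
        · subst hj'
          simp only [true_and, if_pos hjl]
          ring
        · rw [if_neg (by rintro ⟨rfl, -⟩; exact hj' rfl),
              if_neg (fun hc => hj' hc.1), if_neg (fun hc => hj' hc.1)]
      · rw [if_neg (by rintro ⟨rfl, hc⟩; exact hjl hc),
            if_neg (fun hc => hjl hc.2), if_neg (fun hc => hjl hc.2)]

lemma pv_fold_set_row (w : Nat → Int) (i : Nat) : ∀ (k : Nat) (mt : List (List Int)), i < mt.length →
    (List.range k).foldl (fun mt j => mt.set i ((mt.getD i []).set j (w j))) mt
      = mt.set i ((List.range k).foldl (fun r j => r.set j (w j)) (mt.getD i [])) := by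
  intro k
  induction k with
  | zero => intro mt hi; simp only [List.range_zero, List.foldl_nil]; rw [List.getD_eq_getElem mt [] hi]; exact (List.set_getElem_self hi).symm
  | succ k ih =>
    intro mt hi
    rw [List.range_succ, List.foldl_append, List.foldl_append]
    simp only [List.foldl_cons, List.foldl_nil]
    rw [ih mt hi, pv_getD_set, if_pos ⟨rfl, hi⟩, List.set_set]

lemma pv_B_totales (vp : List Int) : ∀ (matriz : List (List Int)) (tot : List Int),
    (∀ fila ∈ matriz, fila.length ≤ tot.length) →
    (matriz.foldl (fun tot fila =>
        (List.range fila.length).foldl (fun t j => t.set j (t.getD j 0 + fila.getD j 0 * vp.getD j 0)) tot) tot).length = tot.length ∧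
    ∀ j, (matriz.foldl (fun tot fila =>
        (List.range fila.length).foldl (fun t j => t.set j (t.getD j 0 + fila.getD j 0 * vp.getD j 0)) tot) tot).getD j 0
      = tot.getD j 0 + pvCol matriz vp j := by
  intro matriz
  induction matriz with
  | nil => intro tot _; simp [pvCol]
  | cons fila rest ih =>
    intro tot hrows
    simp only [List.foldl_cons]
    obtain ⟨h1len, h1get⟩ := pv_fold_set_add (fun j => fila.getD j 0 * vp.getD j 0)
      fila.length tot (hrows fila List.mem_cons_self)
    obtain ⟨h2len, h2get⟩ := ih
      ((List.range fila.length).foldl (fun t j => t.set j (t.getD j 0 + fila.getD j 0 * vp.getD j 0)) tot)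
      (fun f hf => h1len ▸ hrows f (List.mem_cons_of_mem _ hf))
    refine ⟨by rw [h2len, h1len], fun j => ?_⟩
    rw [h2get, h1get]
    simp only [pvCol, pvContrib, List.map_cons, List.sum_cons]
    ring

lemma pv_getD_replicate {α : Type} (m i : Nat) (x d : α) :
    (List.replicate m x).getD i d = if i < m then x else d := by
  simp only [List.getD_eq_getElem?_getD, List.getElem?_replicate]
  split_ifs <;> rfl

lemma pv_A_mt_aux (matriz : List (List Int)) (vp : List Int)
    (hrows : ∀ fila ∈ matriz, fila.length ≤ (matriz.headD []).length) :
    ∀ k, k ≤ matriz.length →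
    ((List.range k).foldl (fun mt i =>
        (List.range (matriz.getD i []).length).foldl (fun mt j =>
          mt.set i ((mt.getD i []).set j ((matriz.getD i []).getD j 0 * vp.getD j 0))) mt)
      (List.replicate matriz.length (List.replicate (matriz.headD []).length (0 : Int)))).length = matriz.length ∧
    ∀ i < matriz.length,
      (((List.range k).foldl (fun mt i =>
        (List.range (matriz.getD i []).length).foldl (fun mt j =>
          mt.set i ((mt.getD i []).set j ((matriz.getD i []).getD j 0 * vp.getD j 0))) mt)
      (List.replicate matriz.length (List.replicate (matriz.headD []).length (0 : Int)))).getD i []).length = (matriz.headD []).length ∧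
      ∀ j, (((List.range k).foldl (fun mt i =>
        (List.range (matriz.getD i []).length).foldl (fun mt j =>
          mt.set i ((mt.getD i []).set j ((matriz.getD i []).getD j 0 * vp.getD j 0))) mt)
      (List.replicate matriz.length (List.replicate (matriz.headD []).length (0 : Int)))).getD i []).getD j 0
        = if i < k then pvContrib vp (matriz.getD i []) j else 0 := by
  intro k
  induction k with
  | zero =>
    intro _
    simp only [List.range_zero, List.foldl_nil]
    refine ⟨List.length_replicate, fun i hi => ?_⟩
    rw [pv_getD_replicate, if_pos hi]
    refine ⟨List.length_replicate, fun j => ?_⟩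
    rw [pv_getD_replicate]
    simp
  | succ k ih =>
    intro hk
    obtain ⟨ihlen, ihrow⟩ := ih (by omega)
    rw [List.range_succ, List.foldl_append]
    simp only [List.foldl_cons, List.foldl_nil]
    have hkm : k < matriz.length := by omega
    have hmem : matriz.getD k [] ∈ matriz := by
      rw [List.getD_eq_getElem matriz [] hkm]; exact List.getElem_mem hkm
    obtain ⟨hrl, hrg⟩ := ihrow k hkm
    rw [pv_fold_set_row _ k _ _ (by rw [ihlen]; exact hkm)]
    obtain ⟨halen, haget⟩ := pv_fold_set_assign
      (fun j => (matriz.getD k []).getD j 0 * vp.getD j 0)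
      (matriz.getD k []).length _ (by rw [hrl]; exact hrows _ hmem)
    refine ⟨by rw [List.length_set, ihlen], fun i hi => ?_⟩
    rw [pv_getD_set, ihlen]
    by_cases hik : k = i
    · subst hik
      rw [if_pos ⟨rfl, hkm⟩]
      refine ⟨by rw [halen, hrl], fun j => ?_⟩
      rw [haget]
      unfold pvContrib
      rw [if_pos (Nat.lt_succ_self k)]
      split_ifs with h1
      · rfl
      · rw [hrg, if_neg (by omega)]
    · rw [if_neg (by rintro ⟨rfl, -⟩; exact hik rfl)]
      obtain ⟨h1, h2⟩ := ihrow i hi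
      refine ⟨h1, fun j => ?_⟩
      rw [h2]
      by_cases hik' : i < k
      · rw [if_pos hik', if_pos (by omega)]
      · rw [if_neg hik', if_neg (by omega)]

lemma pv_range_map_getD {α : Type} (xs : List α) (d : α) :
    (List.range xs.length).map (fun i => xs.getD i d) = xs := by
  apply List.ext_getElem <;> simp [List.getD_eq_getElem?_getD]
  intro i h1 h2; simp [List.getElem?_eq_getElem h1]

lemma pv_A_sumar_aux (mt : List (List Int)) :
    ∀ k, k ≤ (mt.headD []).length →
    ((List.range k).foldl (fun tot j =>
        (List.range mt.length).foldl (fun tot i =>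
          tot.set j (tot.getD j 0 + (mt.getD i []).getD j 0)) tot)
      (List.replicate (mt.headD []).length (0 : Int))).length = (mt.headD []).length ∧
    ∀ j, ((List.range k).foldl (fun tot j =>
        (List.range mt.length).foldl (fun tot i =>
          tot.set j (tot.getD j 0 + (mt.getD i []).getD j 0)) tot)
      (List.replicate (mt.headD []).length (0 : Int))).getD j 0
      = if j < k then ((List.range mt.length).map (fun i => (mt.getD i []).getD j 0)).sum else 0 := by
  intro k
  induction k with
  | zero =>
    intro _
    simp only [List.range_zero, List.foldl_nil]
    refine ⟨List.length_replicate, fun j => ?_⟩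
    rw [pv_getD_replicate]
    simp
  | succ k ih =>
    intro hk
    obtain ⟨ihlen, ihget⟩ := ih (by omega)
    rw [List.range_succ, List.foldl_append]
    simp only [List.foldl_cons, List.foldl_nil]
    obtain ⟨hflen, hfget⟩ := pv_fold_set_fixed
      (fun i => (mt.getD i []).getD k 0) k mt.length
      ((List.range k).foldl (fun tot j =>
        (List.range mt.length).foldl (fun tot i =>
          tot.set j (tot.getD j 0 + (mt.getD i []).getD j 0)) tot)
      (List.replicate (mt.headD []).length (0 : Int)))
    refine ⟨by rw [hflen, ihlen], fun j => ?_⟩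
    rw [hfget]
    by_cases hj : j = k
    · subst hj
      rw [if_pos ⟨rfl, by rw [ihlen]; omega⟩, ihget, if_neg (by omega), if_pos (by omega)]
      ring
    · rw [if_neg (by rintro ⟨rfl, -⟩; exact hj rfl), ihget]
      by_cases hj' : j < k
      · rw [if_pos hj', if_pos (by omega)]
      · rw [if_neg hj', if_neg (by omega)]

lemma pv_headD_getD {α : Type} (xs : List α) (d : α) : xs.headD d = xs.getD 0 d := by
  cases xs <;> simp

lemma pv_eq_range_map (S : List Int) (n : Nat) (f : Nat → Int)
    (hlen : S.length = n) (hget : ∀ j < n, S.getD j 0 = f j) : S = (List.range n).map f := by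
  apply List.ext_getElem
  · simp [hlen]
  · intro j h1 h2
    have hj : j < n := by simpa [hlen] using h1
    rw [← List.getD_eq_getElem S 0 h1, hget j hj]
    simp

lemma pv_map_range_getD {α β : Type} (xs : List α) (d : α) (F : α → β) :
    (List.range xs.length).map (fun i => F (xs.getD i d)) = xs.map F := by
  conv_rhs => rw [← pv_range_map_getD xs d]
  rw [List.map_map]
  rfl

lemma pv_A_vs (matriz : List (List Int)) (vp : List Int) (hne : matriz ≠ [])
    (hrows : ∀ fila ∈ matriz, fila.length ≤ (matriz.headD []).length) :
    pvA_sumar (pvA_calcular matriz vp)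
      = (List.range (matriz.headD []).length).map (pvCol matriz vp) := by
  have hpos : 0 < matriz.length := List.length_pos_of_ne_nil hne
  obtain ⟨hmlen, hmrow⟩ := pv_A_mt_aux matriz vp hrows matriz.length le_rfl
  set mtF := pvA_calcular matriz vp with hmt
  have hmt' : mtF = (List.range matriz.length).foldl (fun mt i =>
      (List.range (matriz.getD i []).length).foldl (fun mt j =>
        mt.set i ((mt.getD i []).set j ((matriz.getD i []).getD j 0 * vp.getD j 0))) mt)
      (List.replicate matriz.length (List.replicate (matriz.headD []).length (0 : Int))) := rfl
  rw [← hmt'] at hmlen hmrow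
  have hhead : (mtF.headD []).length = (matriz.headD []).length := by
    rw [pv_headD_getD]
    exact (hmrow 0 hpos).1
  obtain ⟨hslen, hsget⟩ := pv_A_sumar_aux mtF (mtF.headD []).length le_rfl
  have hsum : pvA_sumar mtF = (List.range (mtF.headD []).length).foldl (fun tot j =>
      (List.range mtF.length).foldl (fun tot i =>
        tot.set j (tot.getD j 0 + (mtF.getD i []).getD j 0)) tot)
      (List.replicate (mtF.headD []).length (0 : Int)) := rfl
  rw [← hsum] at hslen hsget
  rw [← hhead]
  apply pv_eq_range_map _ _ _ hslen
  intro j hj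
  rw [hsget j, if_pos (by rw [hhead] at hj; rw [hhead]; exact hj)]
  have : (List.range mtF.length).map (fun i => (mtF.getD i []).getD j 0)
      = (List.range matriz.length).map (fun i => pvContrib vp (matriz.getD i []) j) := by
    rw [hmlen]
    apply List.map_congr_left
    intro i hi
    rw [(hmrow i (List.mem_range.mp hi)).2 j, if_pos (List.mem_range.mp hi)]
  rw [this]
  unfold pvCol
  rw [pv_map_range_getD matriz [] (fun f => pvContrib vp f j)]

lemma pv_B_vs (matriz : List (List Int)) (vp : List Int)
    (hrows : ∀ fila ∈ matriz, fila.length ≤ (matriz.headD []).length) :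
    (matriz.foldl (fun tot fila =>
        (List.range fila.length).foldl (fun t j => t.set j (t.getD j 0 + fila.getD j 0 * vp.getD j 0)) tot)
      (List.replicate (matriz.headD []).length (0 : Int)))
      = (List.range (matriz.headD []).length).map (pvCol matriz vp) := by
  obtain ⟨hlen, hget⟩ := pv_B_totales vp matriz
    (List.replicate (matriz.headD []).length (0 : Int))
    (by intro fila hf; rw [List.length_replicate]; exact hrows fila hf)
  apply pv_eq_range_map _ _ _ (by rw [hlen, List.length_replicate])
  intro j hj
  rw [hget j, pv_getD_replicate]
  split_ifs
  all_goals ring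

lemma pv_scan_max_inv (vs : List Int) : ∀ k, 1 ≤ k → k ≤ vs.length →
    ∃ idx : Nat, ((List.range k).foldl (fun (st : Int × Int) i =>
        if vs.getD i 0 > st.1 then (vs.getD i 0, (i : Int)) else st) (vs.getD 0 0, 0))
      = (vs.getD idx 0, (idx : Int)) ∧ idx < k ∧
      (∀ i < k, vs.getD i 0 ≤ vs.getD idx 0) ∧ (∀ i < idx, vs.getD i 0 < vs.getD idx 0) := by
  intro k hk
  induction k, hk using Nat.le_induction with
  | base =>
    intro _
    refine ⟨0, ?_, Nat.zero_lt_one, ?_, by omega⟩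
    · simp
    · intro i hi
      interval_cases i
      exact le_refl _
  | succ k hk ih =>
    intro hlen
    obtain ⟨idx, heq, hlt, hle, hstrict⟩ := ih (by omega)
    rw [List.range_succ, List.foldl_append]
    simp only [List.foldl_cons, List.foldl_nil]
    rw [heq]
    by_cases h : vs.getD k 0 > vs.getD idx 0
    · rw [if_pos h]
      refine ⟨k, rfl, by omega, fun i hi => ?_, fun i hi => ?_⟩
      · by_cases hik : i = k
        · subst hik; exact le_refl _
        · exact le_trans (hle i (by omega)) (le_of_lt h)
      · exact lt_of_le_of_lt (hle i (by omega)) h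
    · rw [if_neg h]
      refine ⟨idx, rfl, by omega, fun i hi => ?_, hstrict⟩
      by_cases hik : i = k
      · subst hik; omega
      · exact hle i (by omega)

lemma pv_scan_min_inv (vs : List Int) : ∀ k, 1 ≤ k → k ≤ vs.length →
    ∃ idx : Nat, ((List.range k).foldl (fun (st : Int × Int) i =>
        if vs.getD i 0 < st.1 then (vs.getD i 0, (i : Int)) else st) (vs.getD 0 0, 0))
      = (vs.getD idx 0, (idx : Int)) ∧ idx < k ∧
      (∀ i < k, vs.getD idx 0 ≤ vs.getD i 0) ∧ (∀ i < idx, vs.getD idx 0 < vs.getD i 0) := by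
  intro k hk
  induction k, hk using Nat.le_induction with
  | base =>
    intro _
    refine ⟨0, ?_, Nat.zero_lt_one, ?_, by omega⟩
    · simp
    · intro i hi
      interval_cases i
      exact le_refl _
  | succ k hk ih =>
    intro hlen
    obtain ⟨idx, heq, hlt, hle, hstrict⟩ := ih (by omega)
    rw [List.range_succ, List.foldl_append]
    simp only [List.foldl_cons, List.foldl_nil]
    rw [heq]
    by_cases h : vs.getD k 0 < vs.getD idx 0
    · rw [if_pos h]
      refine ⟨k, rfl, by omega, fun i hi => ?_, fun i hi => ?_⟩
      · by_cases hik : i = k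
        · subst hik; exact le_refl _
        · exact le_trans (le_of_lt h) (hle i (by omega))
      · exact lt_of_lt_of_le h (hle i (by omega))
    · rw [if_neg h]
      refine ⟨idx, rfl, by omega, fun i hi => ?_, hstrict⟩
      by_cases hik : i = k
      · subst hik; omega
      · exact hle i (by omega)

lemma pv_index_first (vs : List Int) (idx : Nat) (hidx : idx < vs.length)
    (hfirst : ∀ i < idx, vs.getD i 0 ≠ vs.getD idx 0) :
    PySem.List.index? vs (vs.getD idx 0) = some idx := by
  rw [PySem.List.index?_eq_some_iff]
  refine ⟨vs.take idx, vs.drop (idx + 1), ?_, ?_, ?_⟩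
  · rw [List.getD_eq_getElem vs 0 hidx]
    conv_lhs => rw [← List.take_append_drop idx vs]
    rw [List.drop_eq_getElem_cons hidx]
  · rw [List.length_take]; omega
  · intro hmem
    obtain ⟨j, hj, hjv⟩ := List.mem_iff_getElem.mp hmem
    have hjlen : j < idx := by rw [List.length_take] at hj; omega
    rw [List.getElem_take] at hjv
    exact hfirst j hjlen (by rw [List.getD_eq_getElem vs 0 (by omega)]; exact hjv)

lemma pv_scan_max_eq (vs : List Int) (hvs : vs ≠ []) :
    ((List.range vs.length).foldl (fun (st : Int × Int) i =>
        if vs.getD i 0 > st.1 then (vs.getD i 0, (i : Int)) else st) (vs.getD 0 0, 0)).2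
    = (match PySem.List.max? vs (fun x => x) with
       | some m => (((PySem.List.index? vs m).getD 0 : Nat) : Int)
       | none => 0) := by
  have hpos : 0 < vs.length := List.length_pos_of_ne_nil hvs
  rcases hm : PySem.List.max? vs (fun x => x) with _ | m
  · rw [PySem.List.max?_eq_none_iff] at hm; exact absurd hm hvs
  · have hmem : m ∈ vs := PySem.List.max?_mem hm
    have hmax : ∀ y ∈ vs, y ≤ m := by
      intro y hy; exact PySem.List.max?_isMax hm y hy
    obtain ⟨idx, heq, hlt, hle, hstrict⟩ := pv_scan_max_inv vs vs.length (by omega) le_rfl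
    rw [heq]
    have hm_eq : m = vs.getD idx 0 := by
      obtain ⟨jm, hjm, hjv⟩ := List.mem_iff_getElem.mp hmem
      refine le_antisymm ?_ ?_
      · rw [← hjv, ← List.getD_eq_getElem vs 0 hjm]; exact hle jm hjm
      · apply hmax
        rw [List.getD_eq_getElem vs 0 hlt]
        exact List.getElem_mem hlt
    rw [hm_eq]
    show (idx : Int) = (((PySem.List.index? vs (vs.getD idx 0)).getD 0 : Nat) : Int)
    rw [pv_index_first vs idx hlt (fun i hi => ne_of_lt (hstrict i hi))]
    rfl

lemma pv_scan_min_eq (vs : List Int) (hvs : vs ≠ []) :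
    ((List.range vs.length).foldl (fun (st : Int × Int) i =>
        if vs.getD i 0 < st.1 then (vs.getD i 0, (i : Int)) else st) (vs.getD 0 0, 0)).2
    = (match PySem.List.min? vs (fun x => x) with
       | some m => (((PySem.List.index? vs m).getD 0 : Nat) : Int)
       | none => 0) := by
  have hpos : 0 < vs.length := List.length_pos_of_ne_nil hvs
  rcases hm : PySem.List.min? vs (fun x => x) with _ | m
  · rw [PySem.List.min?_eq_none_iff] at hm; exact absurd hm hvs
  · have hmem : m ∈ vs := PySem.List.min?_mem hm
    have hmin : ∀ y ∈ vs, m ≤ y := by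
      intro y hy; exact PySem.List.min?_isMin hm y hy
    obtain ⟨idx, heq, hlt, hle, hstrict⟩ := pv_scan_min_inv vs vs.length (by omega) le_rfl
    rw [heq]
    have hm_eq : m = vs.getD idx 0 := by
      obtain ⟨jm, hjm, hjv⟩ := List.mem_iff_getElem.mp hmem
      refine le_antisymm ?_ ?_
      · apply hmin
        rw [List.getD_eq_getElem vs 0 hlt]
        exact List.getElem_mem hlt
      · rw [← hjv, ← List.getD_eq_getElem vs 0 hjm]; exact hle jm hjm
    rw [hm_eq]
    show (idx : Int) = (((PySem.List.index? vs (vs.getD idx 0)).getD 0 : Nat) : Int)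
    rw [pv_index_first vs idx hlt (fun i hi => ne_of_gt (hstrict i hi))]
    rfl

-- ===== VERDICT (by name: the statement is the Claim_ definition above) =====
theorem accion_con_mayor_o_menor_inversion_spec : Claim_equal_accion_con_mayor_o_menor_inversion := by
  intro matriz vp mayor hdom hpre
  obtain ⟨hne, hrow0, hall⟩ := hpre
  have hrows : ∀ fila ∈ matriz, fila.length ≤ (matriz.headD []).length :=
    fun f hf => (hall f hf).1
  have hn : 0 < (matriz.headD []).length := List.length_pos_of_ne_nil hrow0
  unfold Spec_accion_con_mayor_o_menor_inversion
  unfold accion_con_mayor_o_menor_inversion accion_con_mayor_o_menor_inversion_alt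
  simp only []
  rw [pv_A_vs matriz vp hne hrows, pv_B_vs matriz vp hrows]
  have hL : (List.range (matriz.headD []).length).map (pvCol matriz vp) ≠ [] := by
    apply List.ne_nil_of_length_pos
    simpa using hn
  cases mayor with
  | true =>
    simp only [beq_self_eq_true, if_true]
    exact pv_scan_max_eq _ hL
  | false =>
    simp only [beq_true, Bool.false_eq_true, reduceIte]
    exact pv_scan_min_eq _ hL
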